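-- pv_equiv track=rewrite | github.com/HurmainIjazDhillon/visbot-analysis-agent | backend/app/services/scheduling_agent.py | _sample_history
-- ===== SOURCE A (Python) =====
-- def _sample_history(history: list[dict], span_days: int) -> list[dict]:
--     if span_days <= 1 or len(history) <= 200:
--         return history
--     points_per_day = 16
--     buckets: dict[str, list[dict]] = {}
--     for point in history:
--         t = str(point.get("time") or "")
--         day = t[:10] if len(t) >= 10 else "unknown"
--         buckets.setdefault(day, []).append(point)
--
--     sampled: list[dict] = []
--     for day in sorted(buckets.keys()):
--         day_points = buckets[day]
--         if len(day_points) <= points_per_day: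
--             sampled.extend(day_points)
--             continue
--         step = max(1, len(day_points) // points_per_day)
--         picked = [day_points[i] for i in range(0, len(day_points), step)]
--         if day_points[-1] not in picked:
--             picked.append(day_points[-1])
--         sampled.extend(picked[:points_per_day])
--     return sampled
-- ===== SOURCE B (Python) =====
-- def _day_key(point):
--     t = str(point.get("time") or "")
--     return t[:10] if len(t) >= 10 else "unknown"
--
--
-- def _pick(pts, step):
--     # every step-th point, taken by repeatedly slicing the head off
--     picked = []
--     while pts:
--         picked.append(pts[0])
--         pts = pts[step:]
--     return picked
--
--
-- def _subsample(pts):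
--     if len(pts) <= 16:
--         return pts
--     picked = _pick(pts, len(pts) // 16)
--     if pts[-1] not in picked:
--         picked.append(pts[-1])
--     return picked[:16]
--
--
-- def _sample_history(history, span_days):
--     if span_days <= 1 or len(history) <= 200:
--         return history
--     out = []
--     for day in sorted({_day_key(p) for p in history}):
--         out.extend(_subsample([p for p in history if _day_key(p) == day]))
--     return out
-- ===== Notes on version B (the rewrite author's own statement) =====
-- stated objective: alternative
-- what changed: B drops A's dict-of-buckets: it sorts the distinct day keys and filters the history per day, and replaces A's index-arithmetic subsampling (range(0, n, step) indexing) with a head-and-drop-slice pick loop; the early-return guard is unchanged.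
import Mathlib
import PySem

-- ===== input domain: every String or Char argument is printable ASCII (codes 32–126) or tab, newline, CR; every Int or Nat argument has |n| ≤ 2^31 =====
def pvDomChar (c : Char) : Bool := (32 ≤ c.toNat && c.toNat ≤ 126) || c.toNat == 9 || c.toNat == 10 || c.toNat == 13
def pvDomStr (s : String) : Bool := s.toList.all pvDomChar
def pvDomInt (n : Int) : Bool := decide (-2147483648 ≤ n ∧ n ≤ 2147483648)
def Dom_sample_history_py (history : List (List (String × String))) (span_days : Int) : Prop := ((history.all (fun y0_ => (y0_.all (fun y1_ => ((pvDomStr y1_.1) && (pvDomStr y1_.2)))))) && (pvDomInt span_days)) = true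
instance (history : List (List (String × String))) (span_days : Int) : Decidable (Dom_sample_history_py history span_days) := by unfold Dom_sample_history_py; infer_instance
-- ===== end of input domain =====

-- B replaces A's dict bucketing by sorted-distinct-day filtering and A's index-arithmetic pick
-- by a repeated head-and-drop-slice pick (objective: alternative; same observable result).

-- shared Python semantics helpers (used, identically, by both Python versions' sources) --

-- point.get("time"): first-match lookup in the association list
def pvGetTime (p : List (String × String)) : Option String :=
  (p.find? (fun kv => kv.1 == "time")).map (fun kv => kv.2)

-- str(point.get("time") or ""): None ↦ "", a string maps to itself ("" or "" is "")
-- day = t[:10] if len(t) >= 10 else "unknown"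
def pvDay (p : List (String × String)) : String :=
  let t := (pvGetTime p).getD ""
  if 10 ≤ PySem.Str.len t then PySem.Str.slice t none (some 10) else "unknown"

-- Python '==' on two dicts (as association lists): equal key sets and equal values,
-- insertion order ignored — exact for points whose keys are distinct, as dict values are
def pvDictEq (p q : List (String × String)) : Bool :=
  (p.map Prod.fst).all (fun k =>
      ((p.find? (fun kv => kv.1 == k)).map (fun kv => kv.2)) ==
      ((q.find? (fun kv => kv.1 == k)).map (fun kv => kv.2))) &&
  (q.map Prod.fst).all (fun k =>
      ((p.find? (fun kv => kv.1 == k)).map (fun kv => kv.2)) ==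
      ((q.find? (fun kv => kv.1 == k)).map (fun kv => kv.2)))

-- 'x in xs' where the elements are dicts: membership by Python dict equality
def pvMemDict (x : List (String × String)) (xs : List (List (String × String))) : Bool :=
  xs.any (fun y => pvDictEq y x)

-- ===== PORT A =====
def sample_history_py (history : List (List (String × String))) (span_days : Int) : List (List (String × String)) :=
  if span_days ≤ 1 ∨ (history.length : Int) ≤ 200 then history
  else
    -- buckets: setdefault(day, []).append(point) == modify day [] (· ++ [point])
    let buckets : PySem.Dict String (List (List (String × String))) :=
      history.foldl (fun b point => b.modify (pvDay point) [] (fun l => l ++ [point])) PySem.Dict.empty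
    (PySem.List.sorted buckets.keys (fun k => k) false).foldl
      (fun sampled day =>
        let day_points := buckets.getD day []
        if (day_points.length : Int) ≤ 16 then sampled ++ day_points
        else
          let step := max 1 (PySem.Int.floordiv (day_points.length : Int) 16)
          let picked := (PySem.List.pyRange 0 (day_points.length : Int) step).map
            (fun i => PySem.List.pyGetD day_points i [])   -- day_points[i], i always in range
          let lastp := PySem.List.pyGetD day_points (-1) []  -- day_points[-1], nonempty here
          let picked := if pvMemDict lastp picked then picked else picked ++ [lastp]
          sampled ++ PySem.List.slice picked none (some 16)) []

-- ===== PORT B =====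
-- _pick: while pts: picked.append(pts[0]); pts = pts[step:]   (fuel = initial length, only a
-- totalisation guard: for step ≥ 1, the only way B calls it, the loop ends within that fuel)
def pvPickGo (fuel : Nat) (pts : List (List (String × String))) (step : Int) : List (List (String × String)) :=
  match fuel, pts with
  | 0, _ => []
  | _, [] => []
  | f + 1, p :: rest => p :: pvPickGo f (PySem.List.slice (p :: rest) (some step) none) step

def pvPick (pts : List (List (String × String))) (step : Int) : List (List (String × String)) :=
  pvPickGo pts.length pts step

def pvSubsample (pts : List (List (String × String))) : List (List (String × String)) :=
  if (pts.length : Int) ≤ 16 then pts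
  else
    let picked := pvPick pts (PySem.Int.floordiv (pts.length : Int) 16)
    let lastp := PySem.List.pyGetD pts (-1) []   -- pts[-1], nonempty here
    let picked := if pvMemDict lastp picked then picked else picked ++ [lastp]
    PySem.List.slice picked none (some 16)

def sample_history_py_alt (history : List (List (String × String))) (span_days : Int) : List (List (String × String)) :=
  if span_days ≤ 1 ∨ (history.length : Int) ≤ 200 then history
  else
    (PySem.List.sorted (PySem.Set.ofList (history.map pvDay)) (fun k => k) false).foldl
      (fun out day => out ++ pvSubsample (history.filter (fun p => pvDay p == day))) []

-- ===== PRECONDITION & SPEC =====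
def Spec_sample_history_py (history : List (List (String × String))) (span_days : Int) (out : List (List (String × String))) : Prop := out = sample_history_py_alt history span_days
instance (history : List (List (String × String))) (span_days : Int) (out : List (List (String × String))) : Decidable (Spec_sample_history_py history span_days out) := by unfold Spec_sample_history_py; infer_instance

-- ===== CLAIM (what is proved, stated in full; the proofs are below) =====
def Claim_equal_sample_history_py : Prop := ∀ (history : List (List (String × String))) (span_days : Int), Dom_sample_history_py history span_days → Spec_sample_history_py history span_days (sample_history_py history span_days)

-- ===== LEMMAS AND PROOFS =====

-- range(a, b, s) with a positive step is empty when b ≤ a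
theorem pvRange_nil' {a b s : Int} (hb : b ≤ a) (hs : 0 < s) : PySem.List.pyRange a b s = [] := by
  rw [PySem.List.pyRange_of_pos _ _ hs, if_neg (by omega)]; simp

-- range(a, b, s) with 0 < s and a < b starts with a
theorem pvRange_pos_cons (a b : Int) {s : Int} (hs : 0 < s) (hab : a < b) :
    PySem.List.pyRange a b s = a :: PySem.List.pyRange (a + s) b s := by
  rw [PySem.List.pyRange_of_pos _ _ hs, PySem.List.pyRange_of_pos _ _ hs]
  rw [if_pos hab]
  by_cases h : a + s < b
  · rw [if_pos h]
    have e : b - a + s - 1 = (b - (a + s) + s - 1) + 1 * s := by ring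
    have hq : (b - a + s - 1) / s = (b - (a + s) + s - 1) / s + 1 := by
      rw [e, Int.add_mul_ediv_right _ _ (by omega : s ≠ 0)]
    have hnn : 0 ≤ (b - (a + s) + s - 1) / s := Int.ediv_nonneg (by omega) (by omega)
    have ht : ((b - a + s - 1) / s).toNat = ((b - (a + s) + s - 1) / s).toNat + 1 := by omega
    rw [ht, List.range_succ_eq_map]
    simp only [List.map_cons, List.map_map, Nat.cast_zero, mul_zero, add_zero]
    refine congrArg₂ _ rfl ?_
    exact List.map_congr_left fun k _ => by simp only [Function.comp_apply]; push_cast; ring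
  · rw [if_neg h]
    have h1 : (1 : Int) ≤ (b - a + s - 1) / s := by
      rw [Int.le_ediv_iff_mul_le hs]; nlinarith
    have h2 : (b - a + s - 1) / s < 2 := by
      rw [Int.ediv_lt_iff_lt_mul hs]; nlinarith
    have ht : ((b - a + s - 1) / s).toNat = 1 := by omega
    rw [ht]
    simp

-- shifting a positive-step range
theorem pvRange_shift (a b c : Int) {s : Int} (hs : 0 < s) :
    PySem.List.pyRange (a + c) (b + c) s = (PySem.List.pyRange a b s).map (fun x : Int => x + c) := by
  rw [PySem.List.pyRange_of_pos _ _ hs, PySem.List.pyRange_of_pos _ _ hs]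
  have h1 : b + c - (a + c) = b - a := by ring
  have h2 : (a + c < b + c) ↔ (a < b) := by omega
  rw [h1, if_congr h2 rfl rfl, List.map_map]
  exact List.map_congr_left fun k _ => by simp [Function.comp]; ring

-- B's head-and-drop pick equals A's index-arithmetic pick (for a step ≥ 1)
theorem pvPickGo_eq (fuel : Nat) (pts : List (List (String × String))) (s : Nat) (hs : 1 ≤ s)
    (hf : pts.length ≤ fuel) :
    pvPickGo fuel pts (s : Int) =
      (PySem.List.pyRange 0 (pts.length : Int) (s : Int)).map
        (fun i => PySem.List.pyGetD pts i []) := by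
  induction fuel generalizing pts with
  | zero =>
    have : pts = [] := by cases pts <;> simp_all
    subst this
    rw [show ((([]:List (List (String × String))).length : Int)) = 0 by simp,
       pvRange_nil' (le_refl 0) (by exact_mod_cast hs : (0:Int) < (s:Int))]
    simp [pvPickGo]
  | succ f ih =>
    cases pts with
    | nil =>
      rw [show ((([]:List (List (String × String))).length : Int)) = 0 by simp,
         pvRange_nil' (le_refl 0) (by exact_mod_cast hs : (0:Int) < (s:Int))]
      simp [pvPickGo]
    | cons p rest =>
      have hspos : (0 : Int) < (s : Int) := by exact_mod_cast hs
      simp only [pvPickGo]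
      rw [PySem.List.slice_from _ (by positivity), Int.toNat_natCast]
      have hlen : ((p :: rest).length : Int) > 0 := by simp
      rw [pvRange_pos_cons 0 _ hspos hlen, List.map_cons]
      have h0 : PySem.List.pyGetD (p :: rest) 0 [] = p := by
        simp [PySem.List.pyGetD_natCast (p :: rest) 0 []]
      rw [h0]
      refine congrArg₂ _ rfl ?_
      rw [ih _ (by simp at hf ⊢; omega)]
      have hdroplen : (((p :: rest).drop s).length : Int) = max 0 (((p :: rest).length : Int) - s) := by
        simp [List.length_drop]; omega
      have hr : PySem.List.pyRange (0 + (s:Int)) ((p :: rest).length : Int) (s:Int)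
          = (PySem.List.pyRange 0 ((((p :: rest).drop s).length : Int)) (s:Int)).map (fun x : Int => x + (s:Int)) := by
        by_cases hc : (s : Int) < ((p :: rest).length : Int)
        · have h3 := pvRange_shift 0 (((p :: rest).length : Int) - s) (s:Int) hspos
          rw [sub_add_cancel] at h3
          rw [h3, hdroplen, max_eq_right (by omega)]
        · rw [pvRange_nil' (by omega) hspos, hdroplen, max_eq_left (by omega),
              pvRange_nil' (le_refl 0) hspos]
          simp
      rw [hr, List.map_map]
      refine List.map_congr_left fun x hx => ?_
      have hx0 : 0 ≤ x := by
        rcases (PySem.List.mem_pyRange_iff_of_pos hspos x).mp hx with ⟨h1, _, _⟩; exact h1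
      simp only [Function.comp_apply]
      rw [PySem.List.pyGetD_of_nonneg _ _ hx0, PySem.List.pyGetD_of_nonneg _ _ (by omega)]
      have htn : (x + (s:Int)).toNat = s + x.toNat := by omega
      rw [htn]
      rw [List.getD_eq_getElem?_getD, List.getD_eq_getElem?_getD, List.getElem?_drop]

theorem pvPick_eq (pts : List (List (String × String))) (s : Nat) (hs : 1 ≤ s) :
    pvPick pts (s : Int) =
      (PySem.List.pyRange 0 (pts.length : Int) (s : Int)).map
        (fun i => PySem.List.pyGetD pts i []) :=
  pvPickGo_eq pts.length pts s hs le_rfl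

-- A's bucket for a day is the filter of the history by that day key
theorem pvBucket_eq (history : List (List (String × String))) (day : String) :
    (history.foldl (fun b point => b.modify (pvDay point) [] (fun l => l ++ [point]))
        (PySem.Dict.empty : PySem.Dict String (List (List (String × String))))).getD day [] =
      history.filter (fun p => pvDay p == day) := by
  have h := PySem.Dict.getD_foldl_modify_append (history.map (fun x => (pvDay x, x)))
      (PySem.Dict.empty : PySem.Dict String (List (List (String × String)))) day
  rw [List.foldl_map] at h
  simp only [h, List.filter_map, List.map_map, Function.comp_def, PySem.Dict.getD_empty,
    List.nil_append, List.map_id_fun']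
  simp

-- A's bucket keys are the distinct day keys in first-occurrence order
theorem pvKeys_eq (history : List (List (String × String))) :
    (history.foldl (fun b point => b.modify (pvDay point) [] (fun l => l ++ [point]))
        (PySem.Dict.empty : PySem.Dict String (List (List (String × String))))).keys =
      PySem.Set.ofList (history.map pvDay) := by
  rw [PySem.Dict.keys_foldl_modify_key history pvDay [] (fun _ x => (fun l => l ++ [x]))]
  rw [PySem.Dict.keys_empty, PySem.Set.update_nil_left]

-- the two per-day loop bodies agree
theorem pvBody_eq (history : List (List (String × String)))
    (acc : List (List (String × String))) (day : String) :
    (let day_points :=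
        (history.foldl (fun b point => b.modify (pvDay point) [] (fun l => l ++ [point]))
          (PySem.Dict.empty : PySem.Dict String (List (List (String × String))))).getD day []
     if (day_points.length : Int) ≤ 16 then acc ++ day_points
     else
       let step := max 1 (PySem.Int.floordiv (day_points.length : Int) 16)
       let picked := (PySem.List.pyRange 0 (day_points.length : Int) step).map
         (fun i => PySem.List.pyGetD day_points i [])
       let lastp := PySem.List.pyGetD day_points (-1) []
       let picked := if pvMemDict lastp picked then picked else picked ++ [lastp]
       acc ++ PySem.List.slice picked none (some 16)) =
      acc ++ pvSubsample (history.filter (fun p => pvDay p == day)) := by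
  rw [pvBucket_eq]
  set dp := history.filter (fun p => pvDay p == day) with hdp
  by_cases hle : ((dp.length : Int) ≤ 16)
  · simp only [hle, if_pos, pvSubsample]
  · simp only [pvSubsample, hle, if_neg, not_false_iff]
    have hn : 17 ≤ dp.length := by omega
    have hfl : PySem.Int.floordiv (dp.length : Int) 16 = ((dp.length / 16 : Nat) : Int) := by
      exact_mod_cast PySem.Int.floordiv_natCast dp.length 16
    have hs1 : 1 ≤ dp.length / 16 := by omega
    have hmax : max 1 (PySem.Int.floordiv (dp.length : Int) 16) = ((dp.length / 16 : Nat) : Int) := by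
      rw [hfl]; omega
    rw [hmax, hfl, pvPick_eq dp _ hs1]

-- ===== VERDICT (by name: the statement is the Claim_ definition above) =====
theorem sample_history_py_spec : Claim_equal_sample_history_py := by
  intro history span_days _
  unfold Spec_sample_history_py sample_history_py sample_history_py_alt
  by_cases hg : (span_days ≤ 1 ∨ (history.length : Int) ≤ 200)
  · rw [if_pos hg, if_pos hg]
  · simp only [if_neg hg]
    rw [pvKeys_eq]
    exact PySem.List.foldl_congr_mem _ _ _ [] (fun acc day _ => pvBody_eq history acc day)
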